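-- pv_equiv track=rewrite | github.com/iamnenavision/antiSKAT.PY | scat.py | delete_function
-- ===== SOURCE A (Python) =====
-- def delete_function(text, line_to_replace):
--     text = text.split("\n")
--     n = -1
--     open_brackets_counter = 0
--     for i in range(0, len(text)):
--         if line_to_replace in text[i] and n == -1:
--
--             for j in text[i]:
--                 if j == "{":
--                     open_brackets_counter += 1
--                 elif j == "}":
--                     open_brackets_counter -= 1
--             n = i
--             text[i] = ""
--         elif n != -1:
--             for j in text[i]:
--                 if j == "{":
--                     open_brackets_counter += 1
--                 elif j == "}":
--                     open_brackets_counter -= 1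
--             if open_brackets_counter > 0:
--                 text[i] = ""
--             else:
--                 text[i] = ""
--                 break
--
--     temp = text
--     text = ""
--     for i in range(0, len(temp)):
--         text += temp[i] + "\n"
--     return text
-- ===== SOURCE B (Python) =====
-- def delete_function(text, line_to_replace):
--     lines = text.split("\n")
--     n = len(lines)
--     start = next((i for i, l in enumerate(lines) if line_to_replace in l), None)
--     if start is None:
--         return "\n".join(lines) + "\n"
--     prefix = [0] * (n + 1)
--     for i, l in enumerate(lines):
--         prefix[i + 1] = prefix[i] + l.count("{") - l.count("}")
--     end = next((i for i in range(start + 1, n) if prefix[i + 1] - prefix[start] <= 0),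
--                n - 1)
--     return "\n".join("" if start <= i <= end else l
--                      for i, l in enumerate(lines)) + "\n"
-- ===== Notes on version B (the rewrite author's own statement) =====
-- stated objective: alternative
-- what changed: Replaces A's single mutating scan (found-flag + running counter + break, blanking lines in place and concatenating strings) by a staged non-mutating formulation: build a prefix-sum table of per-line brace balances once, obtain the end of the deleted block as a closed index (first i > start with prefix[i+1] - prefix[start] <= 0, default last line), and rebuild the text by blanking the index interval [start, end] in one join.
import Mathlib
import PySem

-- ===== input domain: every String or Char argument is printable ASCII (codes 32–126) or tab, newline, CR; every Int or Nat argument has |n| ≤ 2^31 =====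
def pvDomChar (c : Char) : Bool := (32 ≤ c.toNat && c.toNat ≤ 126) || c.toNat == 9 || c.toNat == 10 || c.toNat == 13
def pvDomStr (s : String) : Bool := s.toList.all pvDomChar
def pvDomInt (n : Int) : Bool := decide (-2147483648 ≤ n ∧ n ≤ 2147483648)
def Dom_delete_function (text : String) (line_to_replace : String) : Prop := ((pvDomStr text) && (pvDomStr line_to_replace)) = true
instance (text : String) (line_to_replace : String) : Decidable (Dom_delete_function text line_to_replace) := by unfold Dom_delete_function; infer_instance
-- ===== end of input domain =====

-- B replaces A's single mutating scan (flag + running counter + break) by a staged,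
-- non-mutating formulation: a prefix-sum table of brace balances, a closed end index
-- found over that table, and a rebuild that blanks the index interval [start, end];
-- objective: alternative (same linear cost).

-- ===== PORT A =====
-- inner 'for j in text[i]' brace-counting loop of A, started at counter c
def pvDeltaA (c : Int) (l : List Char) : Int :=
  l.foldl (fun acc j => if j = '{' then acc + 1 else if j = '}' then acc - 1 else acc) c

-- A's main 'for i in range(0, len(text))' loop: state = (n == -1 as Bool 'found'), counter
def pvLoopA (sub : String) : List (List Char) → Bool → Int → List (List Char)
  | [], _, _ => []
  | l :: rest, found, cnt =>
    if (PySem.Chars.isIn sub.toList l && !found) = true then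
      [] :: pvLoopA sub rest true (pvDeltaA cnt l)
    else if found = true then
      let cnt' := pvDeltaA cnt l
      if cnt' > 0 then [] :: pvLoopA sub rest true cnt'
      else [] :: rest          -- break: the remaining lines stay as they are
    else l :: pvLoopA sub rest found cnt

def delete_function (text : String) (line_to_replace : String) : String :=
  let lines := PySem.Chars.splitOn text.toList ['\n']
  let lines' := pvLoopA line_to_replace lines false 0
  -- final loop: text += temp[i] + "\n"
  String.ofList (lines'.foldl (fun acc l => acc ++ l ++ ['\n']) [])

-- ===== PORT B =====
-- per-line brace balance: l.count("{") - l.count("}")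
def pvDelta (l : List Char) : Int :=
  (PySem.Chars.count l ['{'] : Int) - (PySem.Chars.count l ['}'] : Int)

-- Source B's prefix table: prefix[i+1] = prefix[i] + delta(lines[i]) (built as a scan)
def pvPrefixB : Int → List (List Char) → List Int
  | c, [] => [c]
  | c, l :: rest => c :: pvPrefixB (c + pvDelta l) rest

def delete_function_alt (text : String) (line_to_replace : String) : String :=
  let lines := PySem.Chars.splitOn text.toList ['\n']
  let n := lines.length
  match lines.findIdx? (fun l => PySem.Chars.isIn line_to_replace.toList l) with
  | none => String.ofList (PySem.Chars.join ['\n'] lines ++ ['\n'])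
  | some start =>
    let pre := pvPrefixB 0 lines
    -- end = next(i in range(start+1, n) with prefix[i+1] - prefix[start] <= 0, default n-1)
    let endIdx := ((List.range' (start + 1) (n - (start + 1))).find?
        (fun i => decide (pre[i + 1]?.getD 0 - pre[start]?.getD 0 ≤ 0))).getD (n - 1)
    String.ofList (PySem.Chars.join ['\n']
      ((PySem.List.enumerate lines).map
        (fun p => if (start : Int) ≤ p.1 ∧ p.1 ≤ (endIdx : Int) then [] else p.2)) ++ ['\n'])

-- ===== PRECONDITION & SPEC =====
def Spec_delete_function (text : String) (line_to_replace : String) (out : String) : Prop := out = delete_function_alt text line_to_replace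
instance (text : String) (line_to_replace : String) (out : String) : Decidable (Spec_delete_function text line_to_replace out) := by unfold Spec_delete_function; infer_instance

-- ===== CLAIM (what is proved, stated in full; the proofs are below) =====
def Claim_equal_delete_function : Prop := ∀ (text : String) (line_to_replace : String), Dom_delete_function text line_to_replace → Spec_delete_function text line_to_replace (delete_function text line_to_replace)

-- ===== LEMMAS AND PROOFS =====

-- reference form of A's scan after the match line (proof-side only)
def pvBlankB (bal : Int) : List (List Char) → List (List Char)
  | [] => []
  | l :: rest =>
    let bal' := bal + pvDelta l
    if bal' ≤ 0 then [] :: rest else [] :: pvBlankB bal' rest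

-- total brace balance of a block of lines
def pvS (ls : List (List Char)) : Int := (ls.map pvDelta).sum

-- single-character substring count is character count
lemma pv_countGo_single (c : Char) : ∀ (fuel : Nat) (l : List Char) (acc : Nat),
    l.length ≤ fuel → PySem.Chars.count.go [c] fuel l acc = acc + l.count c := by
  intro fuel
  induction fuel with
  | zero =>
    intro l acc h
    have : l = [] := List.eq_nil_of_length_eq_zero (Nat.le_zero.mp h)
    subst this
    unfold PySem.Chars.count.go; simp
  | succ n ih =>
    intro l acc h
    cases l with
    | nil => unfold PySem.Chars.count.go; simp
    | cons x t =>
      unfold PySem.Chars.count.go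
      simp only [List.length_cons] at h
      by_cases hx : x = c
      · rw [if_pos (by simp [List.isPrefixOf, hx])]
        rw [show List.drop [c].length (x :: t) = t by simp]
        rw [ih t (acc + 1) (by omega)]
        simp [hx]
        omega
      · rw [if_neg (by simp [List.isPrefixOf]; exact fun hc => hx hc.symm)]
        rw [ih t acc (by omega)]
        simp [hx]

lemma pv_count_single (l : List Char) (c : Char) :
    PySem.Chars.count l [c] = l.count c := by
  simp only [PySem.Chars.count, List.isEmpty_cons, if_neg, Bool.false_eq_true, not_false_iff]
  simpa using pv_countGo_single c l.length l 0 (le_refl _)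

-- A's character loop computes the same delta as count('{') - count('}')
lemma pv_deltaA_eq (l : List Char) : ∀ (c : Int), pvDeltaA c l = c + pvDelta l := by
  induction l with
  | nil => intro c; simp [pvDeltaA, pvDelta, PySem.Chars.count]
  | cons x t ih =>
    intro c
    simp only [pvDeltaA, pvDelta, List.foldl_cons] at *
    rw [ih, pv_count_single, pv_count_single, pv_count_single, pv_count_single]
    by_cases h1 : x = '{'
    · simp [h1]; omega
    · by_cases h2 : x = '}'
      · simp [h2]; omega
      · simp [h1, h2]

-- after the match line, A's loop is the reference blanking scan
lemma pv_loopA_found (sub : String) : ∀ (rest : List (List Char)) (c : Int),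
    pvLoopA sub rest true c = pvBlankB c rest := by
  intro rest
  induction rest with
  | nil => intro c; simp [pvLoopA, pvBlankB]
  | cons l t ih =>
    intro c
    simp only [pvLoopA, pvBlankB, Bool.not_true, Bool.and_false, Bool.false_eq_true, if_neg,
      not_false_iff, if_pos, pv_deltaA_eq]
    by_cases h : c + pvDelta l ≤ 0
    · rw [if_neg (by omega), if_pos h]
    · rw [if_pos (by omega), if_neg h, ih]

-- A's loop = find the match line, then the reference scan from the next line
lemma pv_loopA_search (sub : String) : ∀ (lines : List (List Char)),
    pvLoopA sub lines false 0 =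
      match lines.findIdx? (fun l => PySem.Chars.isIn sub.toList l) with
      | none => lines
      | some i =>
        lines.take i ++ [] ::
          pvBlankB (pvDelta (lines[i]?.getD [])) (lines.drop (i + 1)) := by
  intro lines
  induction lines with
  | nil => simp [pvLoopA]
  | cons l t ih =>
    by_cases h : PySem.Chars.isIn sub.toList l = true
    · simp only [pvLoopA, Bool.not_false, Bool.and_true, if_pos, List.findIdx?_cons, h,
        Nat.zero_add, List.take_zero, List.nil_append, List.getElem?_cons_zero, Option.getD_some,
        List.drop_succ_cons, List.drop_zero]
      rw [pv_loopA_found, pv_deltaA_eq]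
      simp
    · have hb : PySem.Chars.isIn sub.toList l = false := by simpa using h
      simp only [pvLoopA, hb, Bool.false_and, Bool.false_eq_true, if_neg, not_false_iff]
      rw [ih]
      rcases hf : t.findIdx? (fun l => PySem.Chars.isIn sub.toList l) with _ | j
      · simp [List.findIdx?_cons, hb, hf]
      · simp [List.findIdx?_cons, hb, hf, List.take_succ_cons]

-- A's string-accumulation join equals '\n'.join(lines) + '\n' on a nonempty list
lemma pv_join_eq : ∀ (lines : List (List Char)) (acc : List Char), lines ≠ [] →
    lines.foldl (fun acc l => acc ++ l ++ ['\n']) acc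
      = acc ++ PySem.Chars.join ['\n'] lines ++ ['\n'] := by
  intro lines
  induction lines with
  | nil => intro acc h; exact absurd rfl h
  | cons l t ih =>
    intro acc _
    cases t with
    | nil => simp [PySem.Chars.join_singleton]
    | cons m u =>
      rw [List.foldl_cons, ih (acc ++ l ++ ['\n']) (by simp), PySem.Chars.join_cons_cons]
      simp

-- splitOn never returns the empty list
lemma pv_splitOnGo_ne_nil (sep : List Char) : ∀ (fuel : Nat) (l cur : List Char) (acc : List (List Char)),
    PySem.Chars.splitOn.go sep fuel l cur acc ≠ [] := by
  intro fuel
  induction fuel with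
  | zero => intro l cur acc; simp [PySem.Chars.splitOn.go]
  | succ n ih =>
    intro l cur acc
    cases l with
    | nil => simp [PySem.Chars.splitOn.go]
    | cons x t =>
      simp only [PySem.Chars.splitOn.go]
      by_cases h : sep.isPrefixOf (x :: t) = true
      · rw [if_pos h]; exact ih _ _ _
      · rw [if_neg h]; exact ih _ _ _

lemma pv_splitOn_ne_nil (s sep : List Char) : PySem.Chars.splitOn s sep ≠ [] := by
  simp only [PySem.Chars.splitOn]
  exact pv_splitOnGo_ne_nil sep _ _ _ _

-- find? respects pointwise-equal predicates
lemma pv_find?_congr {α : Type} (l : List α) (p q : α → Bool)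
    (h : ∀ x ∈ l, p x = q x) : l.find? p = l.find? q := by
  induction l with
  | nil => rfl
  | cons x t ih =>
    simp only [List.find?_cons]
    rw [h x (by simp)]
    cases q x
    · exact ih (fun y hy => h y (by simp [hy]))
    · rfl

-- the prefix table reads back block sums
lemma pv_prefixB_get : ∀ (lines : List (List Char)) (c0 : Int) (i : Nat),
    i ≤ lines.length → (pvPrefixB c0 lines)[i]?.getD 0 = c0 + pvS (lines.take i) := by
  intro lines
  induction lines with
  | nil =>
    intro c0 i h
    simp only [List.length_nil, Nat.le_zero] at h
    subst h
    simp [pvPrefixB, pvS]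
  | cons l t ih =>
    intro c0 i h
    cases i with
    | zero => simp [pvPrefixB, pvS]
    | succ j =>
      simp only [pvPrefixB, List.getElem?_cons_succ, List.take_succ_cons]
      rw [ih (c0 + pvDelta l) j (by simpa using h)]
      simp [pvS]
      ring

lemma pvS_cons (l : List Char) (t : List (List Char)) : pvS (l :: t) = pvDelta l + pvS t := by
  simp [pvS]

lemma pvS_append (a b : List (List Char)) : pvS (a ++ b) = pvS a + pvS b := by
  simp [pvS]

-- the reference scan, characterised by the first index where the running balance drops to ≤ 0
lemma pv_blankB_main : ∀ (rest : List (List Char)) (c : Int) (i0 : Nat),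
    pvBlankB c rest =
      match (List.range' i0 rest.length).find?
          (fun i => decide (c + pvS (rest.take (i - i0 + 1)) ≤ 0)) with
      | none => List.replicate rest.length ([] : List Char)
      | some i => List.replicate (i - i0 + 1) [] ++ rest.drop (i - i0 + 1) := by
  intro rest
  induction rest with
  | nil => intro c i0; simp [pvBlankB]
  | cons l t ih =>
    intro c i0
    have hhd : pvS ((l :: t).take (i0 - i0 + 1)) = pvDelta l := by
      simp [pvS]
    rw [show pvBlankB c (l :: t)
        = if c + pvDelta l ≤ 0 then [] :: t else [] :: pvBlankB (c + pvDelta l) t from rfl]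
    rw [List.length_cons, List.range'_succ, List.find?_cons]
    by_cases h : c + pvDelta l ≤ 0
    · rw [if_pos h]
      rw [show (decide (c + pvS ((l :: t).take (i0 - i0 + 1)) ≤ 0)) = true by
        rw [hhd]; exact decide_eq_true h]
      simp
    · rw [if_neg h]
      rw [show (decide (c + pvS ((l :: t).take (i0 - i0 + 1)) ≤ 0)) = false by
        rw [hhd]; exact decide_eq_false h]
      rw [pv_find?_congr (List.range' (i0 + 1) t.length)
          (fun i => decide (c + pvS ((l :: t).take (i - i0 + 1)) ≤ 0))
          (fun i => decide (c + pvDelta l + pvS (t.take (i - (i0 + 1) + 1)) ≤ 0))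
          (by
            intro i hi
            have hge : i0 + 1 ≤ i := (List.mem_range'_1.mp hi).1
            have h1 : i - i0 + 1 = (i - (i0 + 1) + 1) + 1 := by omega
            show decide (c + pvS (List.take (i - i0 + 1) (l :: t)) ≤ 0)
                = decide (c + pvDelta l + pvS (List.take (i - (i0 + 1) + 1) t) ≤ 0)
            rw [h1, List.take_succ_cons, pvS_cons, ← add_assoc])]
      rw [ih (c + pvDelta l) (i0 + 1)]
      rcases hf : (List.range' (i0 + 1) t.length).find?
          (fun i => decide (c + pvDelta l + pvS (t.take (i - (i0 + 1) + 1)) ≤ 0)) with _ | i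
      · simp [List.replicate_succ]
      · have hge : i0 + 1 ≤ i :=
          (List.mem_range'_1.mp (List.mem_of_find?_eq_some hf)).1
        have h1 : i - i0 + 1 = (i - (i0 + 1) + 1) + 1 := by omega
        simp only [h1, List.replicate_succ, List.drop_succ_cons, List.cons_append]

-- a take of lines around position start, split at start and start+1
lemma pv_seg (lines : List (List Char)) (start k : Nat) (h : start < lines.length) :
    pvS (lines.take (start + 1 + k)) - pvS (lines.take start)
      = pvDelta (lines[start]?.getD []) + pvS ((lines.drop (start + 1)).take k) := by
  have hsplit : lines.take (start + 1 + k)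
      = lines.take start ++ (lines[start]?.getD []) :: (lines.drop (start + 1)).take k := by
    rw [show start + 1 + k = start + (1 + k) from by omega, List.take_add,
        List.drop_eq_getElem_cons h, show 1 + k = k + 1 from by omega, List.take_succ_cons,
        List.getElem?_eq_getElem h]
    simp
  rw [hsplit, pvS_append, pvS_cons]
  ring

-- blanking the index interval [start, end] = take/replicate/drop decomposition
lemma pv_enum_blank (lines : List (List Char)) (start endIdx : Nat)
    (h1 : start ≤ endIdx) (h2 : endIdx < lines.length) :
    (PySem.List.enumerate lines).map
        (fun p => if (start : Int) ≤ p.1 ∧ p.1 ≤ (endIdx : Int) then [] else p.2)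
      = lines.take start ++ List.replicate (endIdx + 1 - start) [] ++ lines.drop (endIdx + 1) := by
  have hsplit : lines
      = lines.take start ++ ((lines.drop start).take (endIdx + 1 - start)) ++ lines.drop (endIdx + 1) := by
    rw [List.append_assoc]
    rw [show lines.drop (endIdx + 1) = (lines.drop start).drop (endIdx + 1 - start) by
      rw [List.drop_drop]; congr 1; omega]
    rw [List.take_append_drop, List.take_append_drop]
  have hlen1 : (lines.take start).length = start := by
    rw [List.length_take]; omega
  have hlen2 : ((lines.drop start).take (endIdx + 1 - start)).length = endIdx + 1 - start := by
    rw [List.length_take, List.length_drop]; omega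
  conv_lhs => rw [hsplit]
  rw [PySem.List.enumerate_append, PySem.List.enumerate_append, List.map_append, List.map_append]
  congr 1
  · congr 1
    · rw [List.map_congr_left (g := fun p => p.2)
        (by
          intro p hp
          obtain ⟨k, hk, rfl⟩ := (PySem.List.mem_enumerate_iff _ _ _).mp hp
          rw [hlen1] at hk
          rw [if_neg]
          push_cast
          omega)]
      exact PySem.List.map_snd_enumerate _ _
    · rw [List.map_congr_left (g := fun _ => ([] : List Char))
        (by
          intro p hp
          obtain ⟨k, hk, rfl⟩ := (PySem.List.mem_enumerate_iff _ _ _).mp hp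
          rw [hlen2] at hk
          rw [if_pos]
          constructor <;> · push_cast [hlen1]; omega)]
      rw [List.map_const', PySem.List.length_enumerate, hlen2]
  · rw [List.map_congr_left (g := fun p => p.2)
      (by
        intro p hp
        obtain ⟨k, hk, rfl⟩ := (PySem.List.mem_enumerate_iff _ _ _).mp hp
        rw [if_neg]
        push_cast [List.length_append, hlen1, hlen2]
        omega)]
    exact PySem.List.map_snd_enumerate _ _

-- ===== VERDICT (by name: the statement is the Claim_ definition above) =====
theorem delete_function_spec : Claim_equal_delete_function := by
  unfold Claim_equal_delete_function
  intro text sub _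
  simp only [Spec_delete_function, delete_function, delete_function_alt]
  rw [pv_loopA_search]
  rcases hf : (PySem.Chars.splitOn text.toList ['\n']).findIdx?
      (fun l => PySem.Chars.isIn sub.toList l) with _ | start
  · simp only
    rw [pv_join_eq _ [] (pv_splitOn_ne_nil _ _)]
    simp
  · simp only
    have hlt : start < (PySem.Chars.splitOn text.toList ['\n']).length :=
      (List.findIdx?_eq_some_iff_findIdx_eq.mp hf).1
    set lines := PySem.Chars.splitOn text.toList ['\n'] with hlines
    have hc : (List.range' (start + 1) (lines.length - (start + 1))).find?
          (fun i => decide ((pvPrefixB 0 lines)[i + 1]?.getD 0 - (pvPrefixB 0 lines)[start]?.getD 0 ≤ 0))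
        = (List.range' (start + 1) (lines.length - (start + 1))).find?
          (fun i => decide (pvDelta (lines[start]?.getD [])
              + pvS ((lines.drop (start + 1)).take (i - (start + 1) + 1)) ≤ 0)) := by
      apply pv_find?_congr
      intro i hi
      obtain ⟨hge, hlt2⟩ := List.mem_range'_1.mp hi
      show decide ((pvPrefixB 0 lines)[i + 1]?.getD 0 - (pvPrefixB 0 lines)[start]?.getD 0 ≤ 0)
          = decide (pvDelta (lines[start]?.getD [])
              + pvS ((lines.drop (start + 1)).take (i - (start + 1) + 1)) ≤ 0)
      rw [pv_prefixB_get lines 0 (i + 1) (by omega), pv_prefixB_get lines 0 start (by omega)]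
      have hseg := pv_seg lines start (i - start) hlt
      rw [show start + 1 + (i - start) = i + 1 from by omega] at hseg
      rw [show i - (start + 1) + 1 = i - start from by omega, ← hseg]
      simp
    rw [hc, pv_blankB_main (lines.drop (start + 1)) (pvDelta (lines[start]?.getD [])) (start + 1),
        List.length_drop]
    rcases hff : (List.range' (start + 1) (lines.length - (start + 1))).find?
        (fun i => decide (pvDelta (lines[start]?.getD [])
            + pvS ((lines.drop (start + 1)).take (i - (start + 1) + 1)) ≤ 0)) with _ | i
    · -- no line brings the balance back: everything from start on is blanked
      rw [Option.getD_none]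
      rw [pv_enum_blank lines start (lines.length - 1) (by omega) (by omega),
          show lines.length - 1 + 1 = lines.length from by omega, List.drop_length,
          List.append_nil,
          show lines.length - start = (lines.length - (start + 1)) + 1 from by omega,
          List.replicate_succ, pv_join_eq _ [] (by simp)]
      simp
    · have hmem := List.mem_range'_1.mp (List.mem_of_find?_eq_some hff)
      rw [Option.getD_some]
      show String.ofList (List.foldl (fun acc l => acc ++ l ++ ['\n']) []
          (List.take start lines ++ [] :: (List.replicate (i - (start + 1) + 1) [] ++
            List.drop (i - (start + 1) + 1) (List.drop (start + 1) lines)))) = _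
      rw [pv_enum_blank lines start i (by omega) (by omega), List.drop_drop,
          show start + 1 + (i - (start + 1) + 1) = i + 1 from by omega,
          show i + 1 - start = (i - (start + 1) + 1) + 1 from by omega,
          List.replicate_succ, pv_join_eq _ [] (by simp)]
      simp [List.replicate_succ]
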